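-- pv_equiv track=rewrite | github.com/justinline/py-find-triangle-type | triangleCheck.py | triangle_type
-- ===== SOURCE A (Python) =====
-- def triangle_type(a,b,c):
--     # Sort given lengths
--     ordered = sorted([a,b,c])
--     x,y,z = ordered[0], ordered[1], ordered[2]
--
--
--     compare = (x ** 2) + (y ** 2)
--     # Check whether Triangle Exists
--     while ((x + y) > z):
--         # Use Cosine rule to check angle type
--         if (z ** 2) < compare:
--             return "Acute"
--         elif (z ** 2) > compare:
--             return "Obtuse"
--         elif (z ** 2) == compare:
--             return "Right Angle"
--     # If triangle isn't possible
--     return "Triangle cannot be made with given sides"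
-- ===== SOURCE B (Python) =====
-- def triangle_type(a, b, c):
--     # Symmetric formulation: no sorting and no max-finding.
--     # A triangle exists iff all three triangle inequalities hold, and a side s
--     # subtends an obtuse/right angle iff 2*s*s exceeds/equals the total of all
--     # three squares (only a largest side can, so the scan order is irrelevant).
--     if a + b > c and b + c > a and c + a > b:
--         t = a * a + b * b + c * c
--         for s in (a, b, c):
--             if 2 * s * s > t:
--                 return "Obtuse"
--             if 2 * s * s == t:
--                 return "Right Angle"
--         return "Acute"
--     return "Triangle cannot be made with given sides"
-- ===== Notes on version B (the rewrite author's own statement) =====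
-- stated objective: alternative
-- what changed: B never orders the sides: it tests all three triangle inequalities symmetrically and classifies by scanning each side, comparing twice its square against the total of the three squares, instead of A's sort-then-compare on the isolated largest side.
import Mathlib
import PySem

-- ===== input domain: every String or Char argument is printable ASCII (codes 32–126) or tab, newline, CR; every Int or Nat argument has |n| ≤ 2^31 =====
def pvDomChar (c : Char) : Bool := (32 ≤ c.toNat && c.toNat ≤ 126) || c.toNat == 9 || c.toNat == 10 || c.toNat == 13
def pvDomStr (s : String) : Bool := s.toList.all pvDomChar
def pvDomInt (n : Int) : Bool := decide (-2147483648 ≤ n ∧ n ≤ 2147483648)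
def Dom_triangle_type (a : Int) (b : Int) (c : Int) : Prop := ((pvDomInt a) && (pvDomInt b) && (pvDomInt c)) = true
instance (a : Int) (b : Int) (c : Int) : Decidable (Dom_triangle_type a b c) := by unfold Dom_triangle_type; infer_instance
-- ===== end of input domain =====

-- B drops A's sort-then-largest-side strategy for a symmetric one: all three triangle
-- inequalities, then a per-side scan of 2*s*s against the total of squares (objective: alternative).

-- ===== PORT A =====
-- while ((x+y) > z): every branch of the body returns and the <,>,== trichotomy is
-- exhaustive, so the loop body runs at most once; ported as an if.
def triangle_type (a : Int) (b : Int) (c : Int) : String :=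
  let ordered := PySem.List.sorted [a, b, c] (fun v => v) false
  let x := PySem.List.pyGetD ordered 0 0
  let y := PySem.List.pyGetD ordered 1 0
  let z := PySem.List.pyGetD ordered 2 0
  let compare := x ^ 2 + y ^ 2
  if x + y > z then
    if z ^ 2 < compare then "Acute"
    else if z ^ 2 > compare then "Obtuse"
    else "Right Angle"
  else "Triangle cannot be made with given sides"

-- ===== PORT B =====
-- the for-loop with early returns, as a structural recursion over the side list
def pvScanSides (t : Int) : List Int → String
  | [] => "Acute"
  | s :: rest =>
    if 2 * s * s > t then "Obtuse"
    else if 2 * s * s = t then "Right Angle"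
    else pvScanSides t rest

def triangle_type_alt (a : Int) (b : Int) (c : Int) : String :=
  if a + b > c ∧ b + c > a ∧ c + a > b then
    pvScanSides (a * a + b * b + c * c) [a, b, c]
  else "Triangle cannot be made with given sides"

-- ===== PRECONDITION & SPEC =====
def Spec_triangle_type (a : Int) (b : Int) (c : Int) (out : String) : Prop := out = triangle_type_alt a b c
instance (a : Int) (b : Int) (c : Int) (out : String) : Decidable (Spec_triangle_type a b c out) := by unfold Spec_triangle_type; infer_instance

-- ===== CLAIM (what is proved, stated in full; the proofs are below) =====
def Claim_equal_triangle_type : Prop := ∀ (a : Int) (b : Int) (c : Int), Dom_triangle_type a b c → Spec_triangle_type a b c (triangle_type a b c)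

-- ===== LEMMAS AND PROOFS =====

-- the angle-classification core A's port ends in, on the sorted sides
def pvJudge (x y z : Int) : String :=
  if x + y > z then
    if z ^ 2 < x ^ 2 + y ^ 2 then "Acute"
    else if z ^ 2 > x ^ 2 + y ^ 2 then "Obtuse"
    else "Right Angle"
  else "Triangle cannot be made with given sides"

lemma tt_judge (a b c : Int) :
    triangle_type a b c =
      pvJudge (PySem.List.pyGetD (PySem.List.sorted [a, b, c] (fun v => v) false) 0 0)
              (PySem.List.pyGetD (PySem.List.sorted [a, b, c] (fun v => v) false) 1 0)
              (PySem.List.pyGetD (PySem.List.sorted [a, b, c] (fun v => v) false) 2 0) := rfl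

lemma sorted3 (a b c x y z : Int) (hp : List.Perm [x, y, z] [a, b, c])
    (h1 : x ≤ y) (h2 : y ≤ z) :
    PySem.List.sorted [a, b, c] (fun v => v) false = [x, y, z] :=
  PySem.List.sorted_id_eq_of_perm_of_pairwise _ _ hp (by simp; omega)

-- B agrees with A's classification of the sorted sides x ≤ y ≤ z
lemma alt_eq_judge (a b c x y z : Int) (hp : List.Perm [x, y, z] [a, b, c])
    (h1 : x ≤ y) (h2 : y ≤ z) :
    triangle_type_alt a b c = pvJudge x y z := by
  have hsum : a + b + c = x + y + z := by
    have h := hp.sum_eq; simp at h; omega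
  have hsq : a * a + b * b + c * c = x * x + y * y + z * z := by
    have h := (hp.map (fun v => v * v)).sum_eq; simp at h; linarith
  have hmem : ∀ v ∈ [a, b, c], v = x ∨ v = y ∨ v = z := by
    intro v hv
    have : v ∈ [x, y, z] := hp.mem_iff.mpr hv
    simpa using this
  have hzm : z = a ∨ z = b ∨ z = c := by
    have : z ∈ [a, b, c] := hp.subset (by simp)
    simpa using this
  have hva := hmem a (by simp)
  have hvb := hmem b (by simp)
  have hvc := hmem c (by simp)
  simp only [triangle_type_alt, pvJudge, pvScanSides]
  by_cases hg : x + y > z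
  · -- triangle exists; all sides positive, z is the (weakly) largest
    have hx0 : 0 < x := by omega
    have hguard : a + b > c ∧ b + c > a ∧ c + a > b := by
      refine ⟨?_, ?_, ?_⟩ <;> rcases hva with rfl | rfl | rfl <;>
        rcases hvb with rfl | rfl | rfl <;> rcases hvc with rfl | rfl | rfl <;> omega
    have hxx : 0 < x * x := mul_pos hx0 hx0
    have hxy : x * x ≤ y * y := by nlinarith
    have hyz : y * y ≤ z * z := by nlinarith
    have px : x ^ 2 = x * x := by ring
    have py : y ^ 2 = y * y := by ring
    have pz : z ^ 2 = z * z := by ring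
    rw [if_pos hguard, if_pos hg, px, py, pz]
    -- a side triggers Obtuse/Right in B's scan iff it plays z's role in A's comparison
    have key : ∀ v, (v = x ∨ v = y ∨ v = z) →
        (2 * v * v > a * a + b * b + c * c ↔ (v = z ∧ z * z > x * x + y * y)) ∧
        (2 * v * v = a * a + b * b + c * c ↔ (v = z ∧ z * z = x * x + y * y)) := by
      intro v hv
      rw [hsq]
      rcases hv with rfl | rfl | rfl
      · refine ⟨⟨fun h => absurd h (by linarith), ?_⟩,
          ⟨fun h => absurd h (by linarith), ?_⟩⟩ <;>
          (rintro ⟨he, h⟩; rw [← he] at h hyz ⊢; linarith)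
      · refine ⟨⟨fun h => absurd h (by linarith), ?_⟩,
          ⟨fun h => absurd h (by linarith), ?_⟩⟩ <;>
          (rintro ⟨he, h⟩; rw [← he] at h ⊢; linarith)
      · exact ⟨⟨fun h => ⟨rfl, by linarith⟩, fun ⟨_, h⟩ => by linarith⟩,
          ⟨fun h => ⟨rfl, by linarith⟩, fun ⟨_, h⟩ => by linarith⟩⟩
    have ka := key a hva
    have kb := key b hvb
    have kc := key c hvc
    by_cases hobt : z * z > x * x + y * y
    · rw [if_neg (show ¬ z * z < x * x + y * y by linarith), if_pos hobt]
      rcases hzm with h | h | h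
      · rw [if_pos (ka.1.mpr ⟨h.symm, hobt⟩)]
      · by_cases h1' : 2 * a * a > a * a + b * b + c * c
        · rw [if_pos h1']
        · rw [if_neg h1',
            if_neg (fun he => absurd (ka.2.mp he).2 (by linarith)),
            if_pos (kb.1.mpr ⟨h.symm, hobt⟩)]
      · by_cases h1' : 2 * a * a > a * a + b * b + c * c
        · rw [if_pos h1']
        · by_cases h2' : 2 * a * a = a * a + b * b + c * c
          · exact absurd (ka.2.mp h2').2 (by linarith)
          · by_cases h3' : 2 * b * b > a * a + b * b + c * c
            · rw [if_neg h1', if_neg h2', if_pos h3']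
            · by_cases h4' : 2 * b * b = a * a + b * b + c * c
              · exact absurd (kb.2.mp h4').2 (by linarith)
              · rw [if_neg h1', if_neg h2', if_neg h3', if_neg h4',
                  if_pos (kc.1.mpr ⟨h.symm, hobt⟩)]
    · by_cases hrt : z * z = x * x + y * y
      · rw [if_neg (show ¬ z * z < x * x + y * y by linarith),
          if_neg (show ¬ z * z > x * x + y * y by linarith)]
        rcases hzm with h | h | h
        · rw [if_neg (fun he => absurd (ka.1.mp he).2 (by linarith)),
            if_pos (ka.2.mpr ⟨h.symm, hrt⟩)]
        · by_cases h2' : 2 * a * a = a * a + b * b + c * c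
          · rw [if_neg (fun he => absurd (ka.1.mp he).2 (by linarith)), if_pos h2']
          · rw [if_neg (fun he => absurd (ka.1.mp he).2 (by linarith)), if_neg h2',
              if_neg (fun he => absurd (kb.1.mp he).2 (by linarith)),
              if_pos (kb.2.mpr ⟨h.symm, hrt⟩)]
        · by_cases h2' : 2 * a * a = a * a + b * b + c * c
          · rw [if_neg (fun he => absurd (ka.1.mp he).2 (by linarith)), if_pos h2']
          · by_cases h4' : 2 * b * b = a * a + b * b + c * c
            · rw [if_neg (fun he => absurd (ka.1.mp he).2 (by linarith)), if_neg h2',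
                if_neg (fun he => absurd (kb.1.mp he).2 (by linarith)), if_pos h4']
            · rw [if_neg (fun he => absurd (ka.1.mp he).2 (by linarith)), if_neg h2',
                if_neg (fun he => absurd (kb.1.mp he).2 (by linarith)), if_neg h4',
                if_neg (fun he => absurd (kc.1.mp he).2 (by linarith)),
                if_pos (kc.2.mpr ⟨h.symm, hrt⟩)]
      · have hac : z * z < x * x + y * y := by
          rcases lt_trichotomy (z * z) (x * x + y * y) with h | h | h
          · exact h
          · exact absurd h hrt
          · exact absurd h hobt
        rw [if_pos hac,
          if_neg (fun he => absurd (ka.1.mp he).2 (by linarith)),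
          if_neg (fun he => absurd (ka.2.mp he).2 (by linarith)),
          if_neg (fun he => absurd (kb.1.mp he).2 (by linarith)),
          if_neg (fun he => absurd (kb.2.mp he).2 (by linarith)),
          if_neg (fun he => absurd (kc.1.mp he).2 (by linarith)),
          if_neg (fun he => absurd (kc.2.mp he).2 (by linarith))]
  · -- no triangle: the inequality involving z fails among a, b, c too
    rw [if_neg hg, if_neg (by rintro ⟨g1, g2, g3⟩; rcases hzm with h | h | h <;> omega)]

-- ===== VERDICT (by name: the statement is the Claim_ definition above) =====
theorem triangle_type_spec : Claim_equal_triangle_type := by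
  intro a b c _
  unfold Spec_triangle_type
  rw [tt_judge]
  rcases le_total a b with hab | hab <;> rcases le_total b c with hbc | hbc
  · rw [sorted3 a b c a b c (List.Perm.refl _) hab hbc]
    exact (alt_eq_judge a b c a b c (List.Perm.refl _) hab hbc).symm
  · rcases le_total a c with hac | hac
    · have hp : List.Perm [a, c, b] [a, b, c] := List.Perm.cons a (List.Perm.swap b c [])
      rw [sorted3 a b c a c b hp hac hbc]
      exact (alt_eq_judge a b c a c b hp hac hbc).symm
    · have hp : List.Perm [c, a, b] [a, b, c] :=
        (List.Perm.swap a c [b]).trans (List.Perm.cons a (List.Perm.swap b c []))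
      rw [sorted3 a b c c a b hp hac hab]
      exact (alt_eq_judge a b c c a b hp hac hab).symm
  · rcases le_total a c with hac | hac
    · have hp : List.Perm [b, a, c] [a, b, c] := List.Perm.swap a b [c]
      rw [sorted3 a b c b a c hp hab hac]
      exact (alt_eq_judge a b c b a c hp hab hac).symm
    · have hp : List.Perm [b, c, a] [a, b, c] :=
        (List.Perm.cons b (List.Perm.swap a c [])).trans (List.Perm.swap a b [c])
      rw [sorted3 a b c b c a hp hbc hac]
      exact (alt_eq_judge a b c b c a hp hbc hac).symm
  · have hp : List.Perm [c, b, a] [a, b, c] := by simpa using List.reverse_perm [a, b, c]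
    rw [sorted3 a b c c b a hp hbc hab]
    exact (alt_eq_judge a b c c b a hp hbc hab).symm
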